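-- pv_equiv track=rewrite | github.com/Odysseia-Arena/Odysseia-Arena | SillyTavernOdysseia/src/utils/macro_processor.py | _find_macros
-- ===== SOURCE A (Python) =====
-- from typing import Dict, Any, Generator, Tuple
--
-- def _find_macros(text: str) -> Generator[Tuple[int, int, str], None, None]:
--     """
--     自定义宏解析器。
--     查找文本中所有最外层的宏，正确处理嵌套深度。
--     按顺序生成 (start_index, end_index, macro_content)。
--     """
--     i = 0
--     n = len(text)
--     while i < n:
--         # 查找潜在宏的开始位置 {{
--         start = text.find("{{", i)
--         if start == -1:
--             break
--
--         # 查找对应的结束位置 }}，同时处理嵌套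
--         depth = 1
--         # j 是搜索光标，从 {{ 之后开始
--         j = start + 2
--         content_start = j
--
--         while j < n:
--             # 使用切片检查 {{ 或 }}
--             if text[j:j+2] == "{{":
--                 depth += 1
--                 j += 2
--             elif text[j:j+2] == "}}":
--                 depth -= 1
--                 if depth == 0:
--                     # 找到了最外层的结束位置 }}
--                     content_end = j
--                     end = j + 2
--                     yield (start, end, text[content_start:content_end])
--                     i = end
--                     break # 退出内部循环，继续外部循环查找下一个宏
--                 j += 2
--             else:
--                 # 普通字符
--                 j += 1
--         else:
--             # 内部循环结束（到达字符串末尾）但 depth 不为 0 (宏未关闭)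
--             # 忽略不完整的双括号。我们停止在此字符串中继续查找宏，保留剩余部分原样。
--             break # 退出外部循环
-- ===== SOURCE B (Python) =====
-- from typing import Generator, Tuple
--
-- def _find_macros(text: str) -> Generator[Tuple[int, int, str], None, None]:
--     """Single flat scan with a stack of open '{{' positions instead of find() + depth counter."""
--     n = len(text)
--     stack = []  # positions of currently open '{{'
--     i = 0
--     while i < n:
--         if text[i:i+2] == "{{":
--             stack.append(i)
--             i += 2
--         elif stack and text[i:i+2] == "}}":
--             outermost = stack.pop()
--             if not stack:
--                 yield (outermost, i + 2, text[outermost + 2:i])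
--             i += 2
--         else:
--             i += 1
--     # a still-open '{{' at the end means nothing further is yielded (unclosed macro)
-- ===== Notes on version B (the rewrite author's own statement) =====
-- stated objective: simpler
-- what changed: Replaces the nested while-loops (outer find('{{') jump plus inner depth-counter scan) with one flat left-to-right scan maintaining a stack of open '{{' positions, yielding a span whenever the stack empties.
import Mathlib
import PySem

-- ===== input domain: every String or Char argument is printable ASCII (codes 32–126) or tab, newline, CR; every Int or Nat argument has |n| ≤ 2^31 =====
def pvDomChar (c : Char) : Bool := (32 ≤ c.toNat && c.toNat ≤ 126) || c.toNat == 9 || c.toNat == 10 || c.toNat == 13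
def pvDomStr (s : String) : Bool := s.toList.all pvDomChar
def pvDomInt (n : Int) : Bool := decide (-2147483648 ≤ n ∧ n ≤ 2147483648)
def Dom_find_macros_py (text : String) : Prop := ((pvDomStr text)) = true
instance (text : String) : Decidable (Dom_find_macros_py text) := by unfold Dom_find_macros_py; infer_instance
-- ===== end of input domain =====

-- B replaces A's nested loops (outer text.find("{{") jump + inner depth-counter scan) with one
-- flat scan keeping a stack of open "{{" positions; objective: simpler decomposition, same cost.
-- Both ports use a Nat fuel argument (entry fuel = length + 1) only to make the Python while
-- loops total structural recursions; with sufficient fuel it never bites (pv*_fuel lemmas below).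

-- ===== PORT A =====
-- text[k:k+2] == "{{" (exact: true iff the chars at k and k+1 both exist and are '{');
-- text[k:k+2] == "}}" likewise
def pvOpenAt (cs : List Char) (k : Nat) : Bool := cs[k]? == some '{' && cs[k+1]? == some '{'
def pvCloseAt (cs : List Char) (k : Nat) : Bool := cs[k]? == some '}' && cs[k+1]? == some '}'

def pvFind2 (cs : List Char) : Nat → Nat → Option Nat
  | 0, _ => none
  | fuel + 1, i =>
    if i < cs.length then
      if pvOpenAt cs i then some i else pvFind2 cs fuel (i + 1)
    else none

def pvAInner (cs : List Char) : Nat → Nat → Nat → Option Nat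
  | 0, _, _ => none
  | fuel + 1, j, depth =>
    if j < cs.length then
      if pvOpenAt cs j then pvAInner cs fuel (j + 2) (depth + 1)
      else if pvCloseAt cs j then
        if depth = 1 then some j else pvAInner cs fuel (j + 2) (depth - 1)
      else pvAInner cs fuel (j + 1) depth
    else none

def pvAOuter (cs : List Char) : Nat → Nat → List (Int × Int × String)
  | 0, _ => []
  | fuel + 1, i =>
    match pvFind2 cs (cs.length + 1) i with
    | none => []
    | some start =>
      match pvAInner cs (cs.length + 1) (start + 2) 1 with
      | none => []
      | some j =>
        ((start : Int), ((j + 2 : Nat) : Int),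
          String.ofList (PySem.List.slice cs (some ((start + 2 : Nat) : Int)) (some ((j : Nat) : Int))))
          :: pvAOuter cs fuel (j + 2)

-- A: outer loop = pvAOuter (find "{{", run the depth-counting inner scan, yield, repeat)
def find_macros_py (text : String) : List (Int × Int × String) :=
  pvAOuter text.toList (text.toList.length + 1) 0

-- ===== PORT B =====
-- one flat scan; stack = positions of currently open "{{" (most recent first)
def pvBLoop (cs : List Char) : Nat → Nat → List Nat → List (Int × Int × String)
  | 0, _, _ => []
  | fuel + 1, i, stack =>
    if i < cs.length then
      if pvOpenAt cs i then pvBLoop cs fuel (i + 2) (i :: stack)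
      else
        match stack with
        | [] => pvBLoop cs fuel (i + 1) []
        | s :: rest =>
          if pvCloseAt cs i then
            match rest with
            | [] =>
              ((s : Int), ((i + 2 : Nat) : Int),
                String.ofList (PySem.List.slice cs (some ((s + 2 : Nat) : Int)) (some ((i : Nat) : Int))))
                :: pvBLoop cs fuel (i + 2) []
            | _ => pvBLoop cs fuel (i + 2) rest
          else pvBLoop cs fuel (i + 1) (s :: rest)
    else []

def find_macros_py_alt (text : String) : List (Int × Int × String) :=
  pvBLoop text.toList (text.toList.length + 1) 0 []


-- ===== PRECONDITION & SPEC =====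
-- A returns normally on every string, so no Pre_ is needed.
def Spec_find_macros_py (text : String) (out : List (Int × Int × String)) : Prop := out = find_macros_py_alt text
instance (text : String) (out : List (Int × Int × String)) : Decidable (Spec_find_macros_py text out) := by unfold Spec_find_macros_py; infer_instance

-- ===== CLAIM (what is proved, stated in full; the proofs are below) =====
def Claim_equal_find_macros_py : Prop := ∀ (text : String), Dom_find_macros_py text → Spec_find_macros_py text (find_macros_py text)

-- ===== LEMMAS AND PROOFS =====
theorem pvFind2_stop (cs : List Char) (f i : Nat) (h : ¬ i < cs.length) :
    pvFind2 cs f i = none := by cases f <;> simp [pvFind2, h]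

theorem pvAInner_stop (cs : List Char) (f j d : Nat) (h : ¬ j < cs.length) :
    pvAInner cs f j d = none := by cases f <;> simp [pvAInner, h]

theorem pvFind2_fuel (cs : List Char) :
    ∀ f1 f2 i : Nat, cs.length - i ≤ f1 → cs.length - i ≤ f2 →
      pvFind2 cs f1 i = pvFind2 cs f2 i := by
  intro f1
  induction f1 with
  | zero =>
    intro f2 i h1 h2
    rw [pvFind2_stop cs 0 i (by omega), pvFind2_stop cs f2 i (by omega)]
  | succ f ih =>
    intro f2 i h1 h2
    by_cases hi : i < cs.length
    · cases f2 with
      | zero => omega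
      | succ f2' =>
        simp only [pvFind2, hi, if_true]
        by_cases hop : pvOpenAt cs i = true
        · simp [hop]
        · simp only [hop, Bool.false_eq_true, if_false]
          exact ih f2' (i + 1) (by omega) (by omega)
    · rw [pvFind2_stop cs _ i hi, pvFind2_stop cs f2 i hi]

theorem pvAInner_fuel (cs : List Char) :
    ∀ f1 f2 j d : Nat, cs.length - j ≤ f1 → cs.length - j ≤ f2 →
      pvAInner cs f1 j d = pvAInner cs f2 j d := by
  intro f1
  induction f1 with
  | zero =>
    intro f2 j d h1 h2
    rw [pvAInner_stop cs 0 j d (by omega), pvAInner_stop cs f2 j d (by omega)]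
  | succ f ih =>
    intro f2 j d h1 h2
    by_cases hj : j < cs.length
    · cases f2 with
      | zero => omega
      | succ f2' =>
        simp only [pvAInner, hj, if_true]
        by_cases hop : pvOpenAt cs j = true
        · simp only [hop, if_true]
          exact ih f2' (j + 2) (d + 1) (by omega) (by omega)
        · by_cases hcl : pvCloseAt cs j = true
          · by_cases hd : d = 1
            · simp [hop, hcl, hd]
            · simp only [hop, Bool.false_eq_true, if_false, hcl, if_true, hd]
              exact ih f2' (j + 2) (d - 1) (by omega) (by omega)
          · simp only [hop, hcl, Bool.false_eq_true, if_false]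
            exact ih f2' (j + 1) d (by omega) (by omega)
    · rw [pvAInner_stop cs _ j d hj, pvAInner_stop cs f2 j d hj]

theorem pvBLoop_stop (cs : List Char) (f i : Nat) (st : List Nat) (h : ¬ i < cs.length) :
    pvBLoop cs f i st = [] := by cases f <;> simp [pvBLoop, h]

theorem pvBLoop_fuel (cs : List Char) :
    ∀ f1 f2 i : Nat, ∀ st : List Nat, cs.length - i ≤ f1 → cs.length - i ≤ f2 →
      pvBLoop cs f1 i st = pvBLoop cs f2 i st := by
  intro f1
  induction f1 with
  | zero =>
    intro f2 i st h1 h2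
    rw [pvBLoop_stop cs 0 i st (by omega), pvBLoop_stop cs f2 i st (by omega)]
  | succ f ih =>
    intro f2 i st h1 h2
    by_cases hi : i < cs.length
    · cases f2 with
      | zero => omega
      | succ f2' =>
        simp only [pvBLoop, hi, if_true]
        by_cases hop : pvOpenAt cs i = true
        · simp only [hop, if_true]
          exact ih f2' (i + 2) (i :: st) (by omega) (by omega)
        · simp only [hop, Bool.false_eq_true, if_false]
          cases st with
          | nil => exact ih f2' (i + 1) [] (by omega) (by omega)
          | cons s rest =>
            by_cases hcl : pvCloseAt cs i = true
            · simp only [hcl, if_true]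
              cases rest with
              | nil =>
                simp only
                rw [ih f2' (i + 2) [] (by omega) (by omega)]
              | cons r rs =>
                simp only
                exact ih f2' (i + 2) (r :: rs) (by omega) (by omega)
            · simp only [hcl, Bool.false_eq_true, if_false]
              exact ih f2' (i + 1) (s :: rest) (by omega) (by omega)
    · rw [pvBLoop_stop cs _ i st hi, pvBLoop_stop cs f2 i st hi]

theorem pvFind2_bounds (cs : List Char) :
    ∀ f i s : Nat, pvFind2 cs f i = some s → i ≤ s ∧ s < cs.length := by
  intro f
  induction f with
  | zero => intro i s h; simp [pvFind2] at h
  | succ f ih =>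
    intro i s h
    by_cases hi : i < cs.length
    · simp only [pvFind2, hi, if_true] at h
      by_cases hop : pvOpenAt cs i = true
      · simp only [hop, if_true, Option.some.injEq] at h; omega
      · simp only [hop, Bool.false_eq_true, if_false] at h
        have := ih (i + 1) s h; omega
    · rw [pvFind2_stop cs _ i hi] at h; simp at h

theorem pvAInner_ge (cs : List Char) :
    ∀ f j d e : Nat, pvAInner cs f j d = some e → j ≤ e := by
  intro f
  induction f with
  | zero => intro j d e h; simp [pvAInner] at h
  | succ f ih =>
    intro j d e h
    by_cases hj : j < cs.length
    · simp only [pvAInner, hj, if_true] at h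
      by_cases hop : pvOpenAt cs j = true
      · simp only [hop, if_true] at h; have := ih (j + 2) (d + 1) e h; omega
      · by_cases hcl : pvCloseAt cs j = true
        · by_cases hd : d = 1
          · simp only [hop, Bool.false_eq_true, if_false, hcl, if_true, hd, Option.some.injEq] at h
            omega
          · simp only [hop, Bool.false_eq_true, if_false, hcl, if_true, hd] at h
            have := ih (j + 2) (d - 1) e h; omega
        · simp only [hop, hcl, Bool.false_eq_true, if_false] at h
          have := ih (j + 1) d e h; omega
    · rw [pvAInner_stop cs _ j d hj] at h; simp at h

theorem pvAOuter_fuel (cs : List Char) :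
    ∀ f1 f2 i : Nat, cs.length - i ≤ f1 → cs.length - i ≤ f2 →
      pvAOuter cs f1 i = pvAOuter cs f2 i := by
  intro f1
  induction f1 with
  | zero =>
    intro f2 i h1 h2
    have hi : ¬ i < cs.length := by omega
    cases f2 with
    | zero => rfl
    | succ f2' => simp [pvAOuter, pvFind2_stop cs _ i hi]
  | succ f ih =>
    intro f2 i h1 h2
    by_cases hi : i < cs.length
    · cases f2 with
      | zero => omega
      | succ f2' =>
        simp only [pvAOuter]
        cases hf : pvFind2 cs (cs.length + 1) i with
        | none => rfl
        | some start =>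
          cases hinner : pvAInner cs (cs.length + 1) (start + 2) 1 with
          | none => simp [hinner]
          | some j =>
            have hb := pvFind2_bounds cs (cs.length + 1) i start hf
            have hg := pvAInner_ge cs (cs.length + 1) (start + 2) 1 j hinner
            simp [hinner, ih f2' (j + 2) (by omega) (by omega)]
    · cases f2 with
      | zero => simp [pvAOuter, pvFind2_stop cs _ i hi]
      | succ f2' => simp [pvAOuter, pvFind2_stop cs _ i hi]

theorem pvB_nonempty (cs : List Char) :
    ∀ (m j : Nat) (tops : List Nat) (s : Nat), cs.length - j ≤ m →
      pvBLoop cs m j (tops ++ [s]) =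
        match pvAInner cs (cs.length + 1) j (tops.length + 1) with
        | none => []
        | some e =>
          ((s : Int), ((e + 2 : Nat) : Int),
            String.ofList (PySem.List.slice cs (some ((s + 2 : Nat) : Int)) (some ((e : Nat) : Int))))
            :: pvBLoop cs (cs.length + 1) (e + 2) []
    := by
  intro m
  induction m with
  | zero =>
    intro j tops s hm
    rw [pvAInner_stop cs _ j _ (by omega)]
    rfl
  | succ m ih =>
    intro j tops s hm
    by_cases hj : j < cs.length
    · by_cases hop : pvOpenAt cs j = true
      · have hstep : pvAInner cs (cs.length + 1) j (tops.length + 1) =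
            pvAInner cs (cs.length + 1) (j + 2) (tops.length + 1 + 1) := by
          conv_lhs => rw [pvAInner]
          simp only [hj, if_true, hop]
          exact pvAInner_fuel cs cs.length (cs.length + 1) (j + 2) _ (by omega) (by omega)
        rw [hstep]
        have hL := ih (j + 2) (j :: tops) s (by omega)
        simp only [List.cons_append, List.length_cons] at hL
        simp only [pvBLoop, hj, if_true, hop, List.cons_append]
        exact hL
      · by_cases hcl : pvCloseAt cs j = true
        · cases tops with
          | nil =>
            have hstep : pvAInner cs (cs.length + 1) j 1 = some j := by
              rw [pvAInner]; simp [hj, hop, hcl]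
            simp only [List.nil_append, List.length_nil, Nat.zero_add] at hstep ⊢
            rw [hstep]
            conv_lhs => rw [pvBLoop]
            simp only [hj, if_true, hop, Bool.false_eq_true, if_false, hcl]
            rw [pvBLoop_fuel cs m (cs.length + 1) (j + 2) [] (by omega) (by omega)]
          | cons t ts =>
            have hstep : pvAInner cs (cs.length + 1) j ((t :: ts).length + 1) =
                pvAInner cs (cs.length + 1) (j + 2) (ts.length + 1) := by
              conv_lhs => rw [pvAInner]
              simp only [hj, if_true, hop, Bool.false_eq_true, if_false, hcl, List.length_cons]
              rw [if_neg (by omega)]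
              have : ts.length + 1 + 1 - 1 = ts.length + 1 := by omega
              rw [this]
              exact pvAInner_fuel cs cs.length (cs.length + 1) (j + 2) _ (by omega) (by omega)
            rw [hstep]
            have hL := ih (j + 2) ts s (by omega)
            simp only [pvBLoop, hj, if_true, hop, Bool.false_eq_true, if_false, hcl,
              List.cons_append]
            cases hts : ts with
            | nil => simpa [hts] using hL
            | cons t2 ts2 => subst hts; simpa using hL
        · have hstep : pvAInner cs (cs.length + 1) j (tops.length + 1) =
              pvAInner cs (cs.length + 1) (j + 1) (tops.length + 1) := by
            conv_lhs => rw [pvAInner]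
            simp only [hj, if_true, hop, Bool.false_eq_true, if_false, hcl]
            exact pvAInner_fuel cs cs.length (cs.length + 1) (j + 1) _ (by omega) (by omega)
          rw [hstep]
          have hL := ih (j + 1) tops s (by omega)
          cases tops with
          | nil =>
            simp only [pvBLoop, hj, if_true, hop, Bool.false_eq_true, if_false, hcl,
              List.nil_append]
            simpa using hL
          | cons t ts =>
            simp only [pvBLoop, hj, if_true, hop, Bool.false_eq_true, if_false, hcl,
              List.cons_append]
            simpa using hL
    · rw [pvBLoop_stop cs _ j _ hj, pvAInner_stop cs _ j _ hj]

theorem pvB_empty (cs : List Char) :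
    ∀ (m i : Nat), cs.length - i ≤ m → pvBLoop cs m i [] = pvAOuter cs m i := by
  intro m
  induction m with
  | zero => intro i hm; rfl
  | succ m ih =>
    intro i hm
    by_cases hi : i < cs.length
    · by_cases hop : pvOpenAt cs i = true
      · have hf : pvFind2 cs (cs.length + 1) i = some i := by
          rw [pvFind2]; simp [hi, hop]
        simp only [pvBLoop, pvAOuter, hi, if_true, hop, hf]
        have hN := pvB_nonempty cs m (i + 2) [] i (by omega)
        simp only [List.nil_append, List.length_nil, Nat.zero_add] at hN
        rw [hN]
        cases hinner : pvAInner cs (cs.length + 1) (i + 2) 1 with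
        | none => simp [hinner]
        | some e =>
          have hge := pvAInner_ge cs (cs.length + 1) (i + 2) 1 e hinner
          simp [pvBLoop_fuel cs (cs.length + 1) m (e + 2) [] (by omega) (by omega),
            ih (e + 2) (by omega)]
      · have hstep : pvFind2 cs (cs.length + 1) i = pvFind2 cs (cs.length + 1) (i + 1) := by
          conv_lhs => rw [pvFind2]
          simp only [hi, if_true, hop, Bool.false_eq_true, if_false]
          exact pvFind2_fuel cs cs.length (cs.length + 1) (i + 1) (by omega) (by omega)
        simp only [pvBLoop, hi, if_true, hop, Bool.false_eq_true, if_false]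
        rw [ih (i + 1) (by omega)]
        conv_rhs => rw [pvAOuter]
        rw [hstep]
        cases m with
        | zero =>
          rw [pvFind2_stop cs _ (i + 1) (by omega)]
          rfl
        | succ m2 =>
          conv_lhs => rw [pvAOuter]
          cases hff : pvFind2 cs (cs.length + 1) (i + 1) with
          | none => rfl
          | some start =>
            cases hin : pvAInner cs (cs.length + 1) (start + 2) 1 with
            | none => simp [hin]
            | some j =>
              have hb := pvFind2_bounds cs (cs.length + 1) (i + 1) start hff
              have hg := pvAInner_ge cs (cs.length + 1) (start + 2) 1 j hin
              simp [hin, pvAOuter_fuel cs m2 (m2 + 1) (j + 2) (by omega) (by omega)]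
    · rw [pvBLoop_stop cs _ i _ hi]
      simp [pvAOuter, pvFind2_stop cs _ i hi]

-- ===== VERDICT (by name: the statement is the Claim_ definition above) =====
theorem find_macros_py_spec : Claim_equal_find_macros_py := by
  intro text _
  unfold Spec_find_macros_py find_macros_py find_macros_py_alt
  exact (pvB_empty text.toList (text.toList.length + 1) 0 (by omega)).symm
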